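-- pv_equiv track=rewrite | github.com/taylor-swift-13/SESpec | represent/scripts/materialize_bench.py | primitive_type
-- ===== SOURCE A (Python) =====
-- def primitive_type(java_type: str) -> str | None:
--     mapping = {
--         "int": "int",
--         "short": "short",
--         "boolean": "int",
--         "char": "char",
--         "long": "long long",
--         "double": "double",
--         "float": "float",
--         "void": "void",
--         "String": "const char *",
--     }
--     if java_type in mapping:
--         return mapping[java_type]
--     if java_type.endswith("[]"):
--         base = primitive_type(java_type[:-2])
--         if base:
--             return f"{base} *"
--     if java_type.endswith("[][]"):
--         base = primitive_type(java_type[:-4])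
--         if base:
--             return f"{base} **"
--     return None
-- ===== SOURCE B (Python) =====
-- def primitive_type(java_type: str) -> str | None:
--     mapping = {
--         "int": "int",
--         "short": "short",
--         "boolean": "int",
--         "char": "char",
--         "long": "long long",
--         "double": "double",
--         "float": "float",
--         "void": "void",
--         "String": "const char *",
--     }
--     dims = 0
--     base = java_type
--     while base.endswith("[]"):
--         base = base[:-2]
--         dims += 1
--     c = mapping.get(base)
--     if c:
--         return c + " *" * dims
--     return None
-- ===== Notes on version B (the rewrite author's own statement) =====
-- stated objective: simpler
-- what changed: Replaces the recursive suffix-stripping with per-level decoration (and its unreachable double-suffix branch) by a single while loop that counts trailing bracket pairs, one dict lookup of the stripped base name, and one repeated-suffix concatenation.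
import Mathlib
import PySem

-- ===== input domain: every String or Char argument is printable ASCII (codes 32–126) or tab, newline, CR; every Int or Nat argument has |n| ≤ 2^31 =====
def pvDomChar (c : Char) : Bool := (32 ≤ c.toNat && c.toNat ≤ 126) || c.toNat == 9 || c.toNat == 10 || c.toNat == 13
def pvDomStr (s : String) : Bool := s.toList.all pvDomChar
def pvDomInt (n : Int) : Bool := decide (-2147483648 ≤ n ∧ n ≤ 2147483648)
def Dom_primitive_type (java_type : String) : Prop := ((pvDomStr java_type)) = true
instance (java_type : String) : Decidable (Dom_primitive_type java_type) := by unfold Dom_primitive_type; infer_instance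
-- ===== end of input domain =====

-- B replaces A's recursive suffix-stripping (with per-level decoration and an unreachable double-suffix
-- branch) by one while loop counting trailing bracket pairs, a single dict lookup and one concatenation (simpler).

-- ===== PORT A =====
-- the literal dict from A (insertion order, distinct keys)
def ptMapping : PySem.Dict (List Char) (List Char) :=
  PySem.Dict.ofList
    [("int".toList, "int".toList), ("short".toList, "short".toList),
     ("boolean".toList, "int".toList), ("char".toList, "char".toList),
     ("long".toList, "long long".toList), ("double".toList, "double".toList),
     ("float".toList, "float".toList), ("void".toList, "void".toList),
     ("String".toList, "const char *".toList)]

-- used by the ports' termination proofs (cited in decreasing_by)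
theorem pt_slice_lt (cs suf : List Char) (h : PySem.Chars.endswith cs suf = true)
    (hs : suf ≠ []) :
    (PySem.List.slice cs none (some (-(suf.length : Int)))).length < cs.length := by
  rcases (PySem.Chars.endswith_iff cs suf).1 h with ⟨p, hp⟩
  have hl : suf.length ≤ cs.length := by
    subst hp; simp
  have h0 : 0 < suf.length := List.length_pos_iff.2 hs
  simp [PySem.List.slice, PySem.List.clampIdx_neg_natCast _ _ h0]
  omega

-- A: recursion on the characters of the string; falsy base (None; "" never occurs) falls through
def primAuxA (cs : List Char) : Option (List Char) :=
  match ptMapping.get? cs with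
  | some v => some v
  | none =>
    let step2 : Option (List Char) :=
      if h2 : PySem.Chars.endswith cs ['[', ']', '[', ']'] then
        match primAuxA (PySem.List.slice cs none (some (-4))) with
        | some b => if b = [] then none else some (b ++ [' ', '*', '*'])
        | none => none
      else none
    if h1 : PySem.Chars.endswith cs ['[', ']'] then
      match primAuxA (PySem.List.slice cs none (some (-2))) with
      | some b => if b = [] then step2 else some (b ++ [' ', '*'])
      | none => step2
    else step2
termination_by cs.length
decreasing_by
  · exact pt_slice_lt cs ['[', ']', '[', ']'] h2 (by decide)
  · exact pt_slice_lt cs ['[', ']'] h1 (by decide)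

def primitive_type (java_type : String) : Option String :=
  (primAuxA java_type.toList).map String.ofList

-- ===== PORT B =====
-- the while loop of Source B: strip trailing "[]" pairs, counting dimensions
def ptStrip (cs : List Char) (dims : Int) : List Char × Int :=
  if h : PySem.Chars.endswith cs ['[', ']'] then
    ptStrip (PySem.List.slice cs none (some (-2))) (dims + 1)
  else (cs, dims)
termination_by cs.length
decreasing_by exact pt_slice_lt cs ['[', ']'] h (by decide)

def primitive_type_alt (java_type : String) : Option String :=
  let bd := ptStrip java_type.toList 0
  match ptMapping.get? bd.1 with
  | some c => if c = [] then none else some (String.ofList (c ++ PySem.List.pyRepeat [' ', '*'] bd.2))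
  | none => none

-- ===== PRECONDITION & SPEC =====
def Spec_primitive_type (java_type : String) (out : Option String) : Prop := out = primitive_type_alt java_type
instance (java_type : String) (out : Option String) : Decidable (Spec_primitive_type java_type out) := by unfold Spec_primitive_type; infer_instance

-- ===== CLAIM (what is proved, stated in full; the proofs are below) =====
def Claim_equal_primitive_type : Prop := ∀ (java_type : String), Dom_primitive_type java_type → Spec_primitive_type java_type (primitive_type java_type)

-- ===== LEMMAS AND PROOFS =====

def ptPairs : List (List Char × List Char) :=
  [("int".toList, "int".toList), ("short".toList, "short".toList),
   ("boolean".toList, "int".toList), ("char".toList, "char".toList),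
   ("long".toList, "long long".toList), ("double".toList, "double".toList),
   ("float".toList, "float".toList), ("void".toList, "void".toList),
   ("String".toList, "const char *".toList)]

theorem ptMapping_eq : ptMapping = PySem.Dict.mk ptPairs := by decide

theorem pt_key_facts (cs v : List Char) (h : ptMapping.get? cs = some v) :
    PySem.Chars.endswith cs ['[', ']'] = false ∧ v ≠ [] := by
  rw [ptMapping_eq] at h
  simp only [ptPairs, PySem.Dict.get?_mk_cons] at h
  split_ifs at h with h1 h2 h3 h4 h5 h6 h7 h8 h9 <;>
    [skip; skip; skip; skip; skip; skip; skip; skip; skip;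
     exact absurd h (by simp [PySem.Dict.get?])] <;>
    (injection h with hh) <;> subst hh <;>
    (first | (cases eq_of_beq h1) | (cases eq_of_beq h2) | (cases eq_of_beq h3) | (cases eq_of_beq h4)
           | (cases eq_of_beq h5) | (cases eq_of_beq h6) | (cases eq_of_beq h7) | (cases eq_of_beq h8)
           | (cases eq_of_beq h9)) <;> exact ⟨by decide, by decide⟩

theorem pt_nonempty (cs b : List Char) (h : primAuxA cs = some b) : b ≠ [] := by
  rw [primAuxA] at h
  cases hv : ptMapping.get? cs with
  | some v => simp only [hv] at h; injection h with h; subst h; exact (pt_key_facts cs v hv).2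
  | none =>
    simp only [hv] at h
    repeat first | (split at h) | (split_ifs at h)
    all_goals (try simp_all)
    all_goals (obtain ⟨h4, h⟩ := h;
               repeat first | (split at h) | (split_ifs at h))
    all_goals (intro hb; simp_all)

theorem pt_strip_acc (cs : List Char) (d : Int) :
    ptStrip cs d = ((ptStrip cs 0).1, (ptStrip cs 0).2 + d) := by
  induction hn : cs.length using Nat.strong_induction_on generalizing cs d with
  | _ n IH =>
  subst hn
  by_cases h : PySem.Chars.endswith cs ['[', ']'] = true
  · have hlt : (PySem.List.slice cs none (some (-2))).length < cs.length := by
      simpa using pt_slice_lt cs ['[', ']'] h (by decide)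
    conv_lhs => rw [ptStrip]
    conv_rhs => rw [ptStrip]
    simp only [h, dite_true]
    rw [IH _ hlt _ (d + 1) rfl, IH _ hlt _ (0 + 1) rfl]
    exact Prod.ext rfl (by omega)
  · conv_lhs => rw [ptStrip]
    conv_rhs => rw [ptStrip]
    simp [h]

theorem pt_strip_nonneg (cs : List Char) : 0 ≤ (ptStrip cs 0).2 := by
  induction hn : cs.length using Nat.strong_induction_on generalizing cs with
  | _ n IH =>
  subst hn
  by_cases h : PySem.Chars.endswith cs ['[', ']'] = true
  · have hlt : (PySem.List.slice cs none (some (-2))).length < cs.length := by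
      simpa using pt_slice_lt cs ['[', ']'] h (by decide)
    rw [ptStrip]
    simp only [h, dite_true]
    rw [pt_strip_acc (PySem.List.slice cs none (some (-2))) (0 + 1)]
    have := IH _ hlt _ rfl
    omega
  · rw [ptStrip]; simp [h]

theorem pt_repeat_succ (d : Int) (hd : 0 ≤ d) (xs : List Char) :
    PySem.List.pyRepeat xs (d + 1) = PySem.List.pyRepeat xs d ++ xs := by
  simp only [PySem.List.pyRepeat]
  rw [show (d + 1).toNat = d.toNat + 1 by omega, List.replicate_succ', List.flatten_append]
  simp

theorem pt_endswith4_2 (cs : List Char) (h : PySem.Chars.endswith cs ['[', ']', '[', ']'] = true) :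
    PySem.Chars.endswith cs ['[', ']'] = true := by
  rcases (PySem.Chars.endswith_iff _ _).1 h with ⟨p, hp⟩
  exact (PySem.Chars.endswith_iff _ _).2 ⟨p ++ ['[', ']'], by simp [← hp]⟩

theorem pt_slice_cancel (p suf : List Char) (hs : suf ≠ []) :
    PySem.List.slice (p ++ suf) none (some (-(suf.length : Int))) = p := by
  have h0 : 0 < suf.length := List.length_pos_iff.2 hs
  simp [PySem.List.slice, PySem.List.clampIdx_neg_natCast _ _ h0, List.take_left']

def ptFinish (b : List Char) (d : Int) : Option (List Char) :=
  match ptMapping.get? b with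
  | some c => if c = [] then none else some (c ++ PySem.List.pyRepeat [' ', '*'] d)
  | none => none

theorem pt_main (cs : List Char) :
    primAuxA cs = ptFinish (ptStrip cs 0).1 (ptStrip cs 0).2 := by
  induction hn : cs.length using Nat.strong_induction_on generalizing cs with
  | _ n IH =>
  subst hn
  by_cases h1 : PySem.Chars.endswith cs ['[', ']'] = true
  case neg =>
    have h4 : ¬ PySem.Chars.endswith cs ['[', ']', '[', ']'] = true :=
      fun hc => h1 (pt_endswith4_2 cs hc)
    rw [primAuxA, ptStrip]
    simp only [h1, h4]
    unfold ptFinish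
    cases hv : ptMapping.get? cs with
    | some v =>
      have hvne := (pt_key_facts cs v hv).2
      simp [hv, hvne, PySem.List.pyRepeat]
    | none => simp [hv]
  case pos =>
    have hlt : (PySem.List.slice cs none (some (-2))).length < cs.length := by
      simpa using pt_slice_lt cs ['[', ']'] h1 (by decide)
    set cs' := PySem.List.slice cs none (some (-2)) with hcs'
    have IH' : primAuxA cs' = ptFinish (ptStrip cs' 0).1 (ptStrip cs' 0).2 := IH _ hlt _ rfl
    have hget : ptMapping.get? cs = none := by
      cases hg : ptMapping.get? cs with
      | none => rfl
      | some v => exact absurd (pt_key_facts cs v hg).1 (by simp [h1])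
    have hstrip : ptStrip cs 0 = ((ptStrip cs' 0).1, (ptStrip cs' 0).2 + 1) := by
      rw [ptStrip]
      simp only [h1, dite_true, ← hcs']
      rw [pt_strip_acc cs' (0 + 1)]
      exact Prod.ext rfl (by omega)
    rw [primAuxA, hstrip]
    simp only [hget, h1, dite_true, ← hcs']
    cases hA : primAuxA cs' with
    | some b =>
      have hb : b ≠ [] := pt_nonempty cs' b hA
      simp only [hb, ite_false]
      rw [IH'] at hA
      unfold ptFinish at hA ⊢
      cases hc : ptMapping.get? (ptStrip cs' 0).1 with
      | none => simp only [hc] at hA; exact absurd hA (by simp)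
      | some c =>
        simp only [hc] at hA ⊢
        by_cases hce : c = []
        · rw [if_pos hce] at hA; exact absurd hA (by simp)
        · rw [if_neg hce] at hA ⊢
          injection hA with hA
          rw [pt_repeat_succ _ (pt_strip_nonneg cs'), ← List.append_assoc, hA]
    | none =>
      simp only [hA]
      have hBnone : ptFinish (ptStrip cs' 0).1 ((ptStrip cs' 0).2 + 1) = none := by
        rw [hA] at IH'
        unfold ptFinish at IH' ⊢
        cases hc : ptMapping.get? (ptStrip cs' 0).1 with
        | none => rfl
        | some c =>
          simp only [hc] at IH' ⊢
          by_cases hce : c = []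
          · rw [if_pos hce]
          · rw [if_neg hce] at IH'; exact absurd IH' (by simp)
      rw [hBnone]
      by_cases h4 : PySem.Chars.endswith cs ['[', ']', '[', ']'] = true
      · rcases (PySem.Chars.endswith_iff _ _).1 h4 with ⟨q, hq⟩
        have hcs4 : PySem.List.slice cs none (some (-4)) = q := by
          rw [← hq, show ((-4 : Int)) = -((['[', ']', '[', ']'].length : Nat) : Int) by norm_num]
          exact pt_slice_cancel q ['[', ']', '[', ']'] (by decide)
        have hcs2 : cs' = q ++ ['[', ']'] := by
          rw [hcs', ← hq,
            show (q ++ ['[', ']', '[', ']'] : List Char) = (q ++ ['[', ']']) ++ ['[', ']'] by simp,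
            show ((-2 : Int)) = -(((['[', ']'] : List Char).length : Nat) : Int) by norm_num]
          exact pt_slice_cancel (q ++ ['[', ']']) ['[', ']'] (by decide)
        have he2 : PySem.Chars.endswith cs' ['[', ']'] = true := by
          rw [hcs2]; exact (PySem.Chars.endswith_iff _ _).2 ⟨q, rfl⟩
        have hget' : ptMapping.get? cs' = none := by
          cases hg : ptMapping.get? cs' with
          | none => rfl
          | some v => exact absurd (pt_key_facts cs' v hg).1 (by simp [he2])
        have hq' : PySem.List.slice cs' none (some (-2)) = q := by
          rw [hcs2, show ((-2 : Int)) = -(((['[', ']'] : List Char).length : Nat) : Int) by norm_num]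
          exact pt_slice_cancel q ['[', ']'] (by decide)
        have hq_none : primAuxA q = none := by
          cases hAq : primAuxA q with
          | none => rfl
          | some b2 =>
            exfalso
            have hb2 : b2 ≠ [] := pt_nonempty q b2 hAq
            rw [primAuxA] at hA
            simp only [hget', he2, dite_true, hq', hAq, hb2, ite_false] at hA
            exact Option.some_ne_none _ hA
        simp [h4, hcs4, hq_none]
      · simp [h4]

-- ===== VERDICT (by name: the statement is the Claim_ definition above) =====
theorem primitive_type_spec : Claim_equal_primitive_type := by
  intro java_type _
  unfold Spec_primitive_type primitive_type primitive_type_alt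
  rw [pt_main]
  unfold ptFinish
  cases h : ptMapping.get? (ptStrip java_type.toList 0).1 with
  | none => simp only [h, Option.map_none]
  | some c =>
    simp only [h]
    by_cases hc : c = []
    · rw [if_pos hc, if_pos hc]; rfl
    · rw [if_neg hc, if_neg hc]
      simp
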